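-- pv_equiv track=rewrite | github.com/Kek01101/ISA | binary_conversion.py | binary_to_hex2
-- ===== SOURCE A (Python) =====
-- def intLen(num):
--     count = 0
--     while num > 0:
--         num = num // 10
--         count += 1
--     return count
--
-- def numSep(num, a, l):
--     return (num // 10**(l-a-1))%10
--
-- def binary_to_denary(num):
--     denary = 0
--     l = intLen(num)
--     for a in range(l):
--         denary += 2**(l-a-1) * numSep(num, a, l)
--     return denary
--
-- letters = ["A", "B", "C", "D", "E", "F"]
--
-- def binary_to_hex2(byte):
--     hex = ""
--     byte = binary_to_denary(byte)
--     while byte != 0: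
--         if byte%16 > 9:
--             hex += letters[byte%16-10]
--         else:
--             hex += str(byte%16)
--         byte = byte//16
--     return hex[::-1]
-- ===== SOURCE B (Python) =====
-- def _denary(b):
--     # value of b's decimal digits read as binary digits (Horner from the low end)
--     return 0 if b <= 0 else 2 * _denary(b // 10) + b % 10
--
-- def _hex(n):
--     # uppercase hex string, most significant digit first, '' for nonpositive n
--     return "" if n <= 0 else _hex(n // 16) + "0123456789ABCDEF"[n % 16]
--
-- def binary_to_hex2(byte):
--     return _hex(_denary(byte))
-- ===== Notes on version B (the rewrite author's own statement) =====
-- stated objective: simpler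
-- what changed: Replaces the length-then-power positional sum (intLen plus a fresh power of ten per digit) by a single low-end Horner recursion on divmod-by-ten, and the hex while-loop with its letters list and final string reversal by a front-building recursion over a hex digit table, so no length computation, no powers and no reversal remain.
import Mathlib
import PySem

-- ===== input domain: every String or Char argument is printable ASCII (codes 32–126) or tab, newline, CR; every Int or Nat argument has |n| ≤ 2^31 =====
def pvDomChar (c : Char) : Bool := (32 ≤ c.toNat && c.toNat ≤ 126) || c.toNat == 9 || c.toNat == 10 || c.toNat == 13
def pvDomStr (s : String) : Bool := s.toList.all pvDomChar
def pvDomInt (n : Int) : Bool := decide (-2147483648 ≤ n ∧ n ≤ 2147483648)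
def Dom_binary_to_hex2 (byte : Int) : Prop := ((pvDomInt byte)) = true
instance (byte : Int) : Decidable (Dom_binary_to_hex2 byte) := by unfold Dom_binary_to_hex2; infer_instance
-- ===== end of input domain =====

-- B replaces A's intLen/10**power positional sum and %16-loop-then-reverse by two
-- plain recursions (low-end Horner on decimal digits; front-building hex table lookup): simpler.


-- ===== PORT A =====
def intLen (num : Int) : Int :=
  -- while num > 0: num //= 10; count += 1
  if 0 < num then intLen (PySem.Int.floordiv num 10) + 1 else 0
termination_by num.toNat
decreasing_by
  rw [PySem.Int.floordiv_eq_ediv_of_pos (by omega : (0:Int) < 10)]; omega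

-- numSep(num, a, l): 10**(l-a-1) is only reached with 0 ≤ l-a-1 (a ranges over range(l)),
-- where Int ^ (l-a-1).toNat is exact
def numSep (num a l : Int) : Int :=
  PySem.Int.mod (PySem.Int.floordiv num ((10:Int) ^ (l - a - 1).toNat)) 10

def binary_to_denary (num : Int) : Int :=
  let l := intLen num
  (PySem.List.pyRange 0 l 1).foldl
    (fun denary a => denary + (2:Int) ^ (l - a - 1).toNat * numSep num a l) 0

def lettersA : List (List Char) := [['A'], ['B'], ['C'], ['D'], ['E'], ['F']]

-- the while loop of binary_to_hex2, fuel = byte.toNat + 1 (enough: byte//16 < byte while 0 < byte;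
-- the loop is only entered with byte = binary_to_denary … ≥ 0)
def hexWhileA : Nat → Int → List Char → List Char
  | 0, _, hex => hex
  | fuel + 1, byte, hex =>
    if byte ≠ 0 then
      hexWhileA fuel (PySem.Int.floordiv byte 16)
        (hex ++ (if PySem.Int.mod byte 16 > 9 then
                   PySem.List.pyGetD lettersA (PySem.Int.mod byte 16 - 10) []
                 else PySem.Int.toChars (PySem.Int.mod byte 16)))
    else hex

def binary_to_hex2 (byte : Int) : String :=
  let b := binary_to_denary byte
  -- hex[::-1] is List.reverse (PySem.Str.slice?_none_none_neg_one)
  String.ofList (hexWhileA (b.toNat + 1) b []).reverse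

-- ===== PORT B =====
def denaryAlt (b : Int) : Int :=
  if b ≤ 0 then 0 else 2 * denaryAlt (PySem.Int.floordiv b 10) + PySem.Int.mod b 10
termination_by b.toNat
decreasing_by
  rw [PySem.Int.floordiv_eq_ediv_of_pos (by omega : (0:Int) < 10)]; omega

def hexTable : List Char :=
  ['0','1','2','3','4','5','6','7','8','9','A','B','C','D','E','F']

def hexAlt (n : Int) : List Char :=
  if n ≤ 0 then [] else hexAlt (PySem.Int.floordiv n 16) ++ [PySem.List.pyGetD hexTable (PySem.Int.mod n 16) ' ']
termination_by n.toNat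
decreasing_by
  rw [PySem.Int.floordiv_eq_ediv_of_pos (by omega : (0:Int) < 16)]; omega

def binary_to_hex2_alt (byte : Int) : String :=
  String.ofList (hexAlt (denaryAlt byte))

-- ===== PRECONDITION & SPEC =====
def Spec_binary_to_hex2 (byte : Int) (out : String) : Prop := out = binary_to_hex2_alt byte
instance (byte : Int) (out : String) : Decidable (Spec_binary_to_hex2 byte out) := by unfold Spec_binary_to_hex2; infer_instance

-- ===== CLAIM (what is proved, stated in full; the proofs are below) =====
def Claim_equal_binary_to_hex2 : Prop := ∀ (byte : Int), Dom_binary_to_hex2 byte → Spec_binary_to_hex2 byte (binary_to_hex2 byte)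

-- ===== LEMMAS AND PROOFS =====

theorem intLen_nonneg (num : Int) : 0 ≤ intLen num := by
  unfold intLen
  split
  · have := intLen_nonneg (PySem.Int.floordiv num 10); omega
  · omega
termination_by num.toNat
decreasing_by
  rw [PySem.Int.floordiv_eq_ediv_of_pos (by omega : (0:Int) < 10)]; omega

theorem denaryAlt_nonneg (b : Int) : 0 ≤ denaryAlt b := by
  unfold denaryAlt
  split
  · omega
  · have h1 := denaryAlt_nonneg (PySem.Int.floordiv b 10)
    have h2 := PySem.Int.mod_nonneg b (by omega : (0:Int) < 10)
    omega
termination_by b.toNat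
decreasing_by
  rw [PySem.Int.floordiv_eq_ediv_of_pos (by omega : (0:Int) < 10)]; omega

-- the inner sum of binary_to_denary, with the length as an explicit Nat
def loopA (num : Int) (L : Nat) : Int :=
  (PySem.List.pyRange 0 (L : Int) 1).foldl
    (fun denary a => denary + (2:Int) ^ (((L : Int)) - a - 1).toNat * numSep num a (L : Int)) 0

theorem binary_to_denary_eq_loopA (num : Int) :
    binary_to_denary num = loopA num (intLen num).toNat := by
  have h := intLen_nonneg num
  unfold binary_to_denary loopA
  rw [Int.toNat_of_nonneg h]

theorem loopA_succ (num : Int) (L : Nat) :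
    loopA num (L + 1) = 2 * loopA (PySem.Int.floordiv num 10) L + PySem.Int.mod num 10 := by
  unfold loopA
  have hsplit : PySem.List.pyRange 0 ((L : Int) + 1) 1
      = PySem.List.pyRange 0 (L : Int) 1 ++ [(L : Int)] :=
    PySem.List.pyRange_one_succ_right (by positivity)
  push_cast
  rw [hsplit, List.foldl_append]
  have hlast : ∀ s : Int,
      s + (2:Int) ^ (((L : Int) + 1) - (L : Int) - 1).toNat * numSep num (L : Int) ((L : Int) + 1)
        = s + PySem.Int.mod num 10 := by
    intro s
    simp [numSep, PySem.Int.floordiv]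
  simp only [List.foldl_cons, List.foldl_nil, hlast]
  -- rewrite each term of the prefix sum
  have hterm : ∀ (acc : Int) (a : Int), a ∈ PySem.List.pyRange 0 (L : Int) 1 →
      acc + (2:Int) ^ (((L : Int) + 1) - a - 1).toNat * numSep num a ((L : Int) + 1)
        = acc + 2 * ((2:Int) ^ (((L : Int)) - a - 1).toNat * numSep (PySem.Int.floordiv num 10) a (L : Int)) := by
    intro acc a ha
    rw [PySem.List.mem_pyRange_one] at ha
    have hk : (((L : Int) + 1) - a - 1).toNat = ((L : Int) - a - 1).toNat + 1 := by omega
    have hsep : numSep num a ((L : Int) + 1) = numSep (PySem.Int.floordiv num 10) a (L : Int) := by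
      unfold numSep
      congr 1
      have hpow : (10:Int) ^ ((((L:Int)+1) - a - 1).toNat) = 10 * (10:Int) ^ (((L:Int) - a - 1).toNat) := by
        rw [hk, pow_succ]; ring
      rw [hpow,
          PySem.Int.floordiv_eq_ediv_of_pos (by positivity : (0:Int) < 10 * (10:Int) ^ (((L:Int)) - a - 1).toNat),
          PySem.Int.floordiv_eq_ediv_of_pos (by omega : (0:Int) < 10),
          PySem.Int.floordiv_eq_ediv_of_pos (by positivity : (0:Int) < (10:Int) ^ (((L:Int)) - a - 1).toNat),
          Int.ediv_ediv_of_nonneg (by omega : (0:Int) ≤ 10)]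
    rw [hsep, hk]
    ring
  rw [PySem.List.foldl_congr_mem (PySem.List.pyRange 0 (L : Int) 1)
        (fun denary a => denary + (2:Int) ^ (((L : Int) + 1) - a - 1).toNat * numSep num a ((L : Int) + 1))
        (fun denary a => denary + 2 * ((2:Int) ^ (((L : Int)) - a - 1).toNat * numSep (PySem.Int.floordiv num 10) a (L : Int)))
        0 hterm]
  -- pull the factor 2 out of the foldl
  have hfactor : ∀ (L' : List Int) (init : Int),
      L'.foldl (fun acc a => acc + 2 * ((2:Int) ^ (((L : Int)) - a - 1).toNat * numSep (PySem.Int.floordiv num 10) a (L : Int))) (2 * init)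
        = 2 * L'.foldl (fun acc a => acc + (2:Int) ^ (((L : Int)) - a - 1).toNat * numSep (PySem.Int.floordiv num 10) a (L : Int)) init := by
    intro L' 
    induction L' with
    | nil => intro init; simp
    | cons x xs ih =>
      intro init
      simp only [List.foldl_cons]
      rw [← mul_add, ih]
  have hf := hfactor (PySem.List.pyRange 0 (L : Int) 1) 0
  simp only [mul_zero] at hf
  rw [hf]

theorem intLen_pos_step (num : Int) (h : 0 < num) :
    intLen num = intLen (PySem.Int.floordiv num 10) + 1 := by
  rw [intLen]; simp [h]

theorem denary_eq (num : Int) : binary_to_denary num = denaryAlt num := by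
  by_cases h : num ≤ 0
  · have hl : intLen num = 0 := by rw [intLen, if_neg (by omega : ¬ 0 < num)]
    rw [binary_to_denary_eq_loopA, hl, denaryAlt, if_pos h]
    simp [loopA, PySem.List.pyRange_one_eq_nil]
  · have h' : 0 < num := by omega
    have ih := denary_eq (PySem.Int.floordiv num 10)
    have hstep := intLen_pos_step num h'
    have hnn := intLen_nonneg (PySem.Int.floordiv num 10)
    rw [binary_to_denary_eq_loopA, hstep]
    have htn : (intLen (PySem.Int.floordiv num 10) + 1).toNat
        = (intLen (PySem.Int.floordiv num 10)).toNat + 1 := by omega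
    rw [htn, loopA_succ, ← binary_to_denary_eq_loopA, ih]
    conv_rhs => rw [denaryAlt]
    rw [if_neg h]
termination_by num.toNat
decreasing_by
  rw [PySem.Int.floordiv_eq_ediv_of_pos (by omega : (0:Int) < 10)]; omega

-- one hex digit: A's branch (letters list / str) = B's table lookup, for 0 ≤ d < 16
theorem digit_eq (d : Int) (h0 : 0 ≤ d) (h16 : d < 16) :
    (if d > 9 then PySem.List.pyGetD lettersA (d - 10) [] else PySem.Int.toChars d)
      = [PySem.List.pyGetD hexTable d ' '] := by
  interval_cases d <;> decide

theorem hexWhileA_eq (fuel : Nat) (n : Int) (acc : List Char)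
    (hn : 0 ≤ n) (hf : n.toNat < fuel) :
    hexWhileA fuel n acc = acc ++ (hexAlt n).reverse := by
  match fuel with
  | fuel + 1 =>
    by_cases h : n = 0
    · subst h
      rw [hexWhileA, hexAlt]; simp
    · have hpos : 0 < n := by omega
      rw [hexWhileA]
      simp only [if_pos h]
      have hd0 : 0 ≤ PySem.Int.mod n 16 := PySem.Int.mod_nonneg n (by omega)
      have hd16 : PySem.Int.mod n 16 < 16 := PySem.Int.mod_lt n (by omega)
      have hq0 : 0 ≤ PySem.Int.floordiv n 16 := by
        rw [PySem.Int.floordiv_eq_ediv_of_pos (by omega : (0:Int) < 16)]; omega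
      have hqlt : (PySem.Int.floordiv n 16).toNat < fuel := by
        rw [PySem.Int.floordiv_eq_ediv_of_pos (by omega : (0:Int) < 16)]; omega
      rw [hexWhileA_eq fuel _ _ hq0 hqlt]
      conv_rhs => rw [hexAlt]
      simp only [if_neg (by omega : ¬ n ≤ 0)]
      rw [digit_eq _ hd0 hd16]
      simp

theorem hex_eq (n : Int) (hn : 0 ≤ n) :
    (hexWhileA (n.toNat + 1) n []).reverse = hexAlt n := by
  rw [hexWhileA_eq (n.toNat + 1) n [] hn (by omega)]
  simp

-- ===== VERDICT (by name: the statement is the Claim_ definition above) =====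
theorem binary_to_hex2_spec : Claim_equal_binary_to_hex2 := by
  intro byte _
  unfold Spec_binary_to_hex2
  simp only [binary_to_hex2, binary_to_hex2_alt]
  rw [denary_eq, hex_eq _ (denaryAlt_nonneg byte)]
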